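-- pv_equiv track=rewrite | github.com/bretbenz84/djr3x-v2 | features/games.py | _trivia_theme_from_game_name
-- ===== SOURCE A (Python) =====
-- from typing import Optional
--
-- def _trivia_theme_from_game_name(name: str) -> Optional[str]:
--     clean = " ".join(name.lower().strip().split())
--     for suffix in (" trivia game", " trivia"):
--         if clean.endswith(suffix):
--             theme = clean[: -len(suffix)].strip()
--             if theme:
--                 return theme
--     return None
-- ===== SOURCE B (Python) =====
-- from typing import Optional
--
-- def _trivia_theme_from_game_name(name: str) -> Optional[str]:
--     words = name.lower().strip().split()
--     if words[-2:] == ["trivia", "game"]: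
--         kept = words[:-2]
--     elif words[-1:] == ["trivia"]:
--         kept = words[:-1]
--     else:
--         return None
--     return " ".join(kept) if kept else None
-- ===== Notes on version B (the rewrite author's own statement) =====
-- stated objective: simpler
-- what changed: B tokenizes the normalized name once and inspects the last one/two words of the word list (words[-2:] == ['trivia','game'] / words[-1:] == ['trivia']), instead of A's normalize-join-then-string-suffix matching with slicing and re-stripping.
import Mathlib
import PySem

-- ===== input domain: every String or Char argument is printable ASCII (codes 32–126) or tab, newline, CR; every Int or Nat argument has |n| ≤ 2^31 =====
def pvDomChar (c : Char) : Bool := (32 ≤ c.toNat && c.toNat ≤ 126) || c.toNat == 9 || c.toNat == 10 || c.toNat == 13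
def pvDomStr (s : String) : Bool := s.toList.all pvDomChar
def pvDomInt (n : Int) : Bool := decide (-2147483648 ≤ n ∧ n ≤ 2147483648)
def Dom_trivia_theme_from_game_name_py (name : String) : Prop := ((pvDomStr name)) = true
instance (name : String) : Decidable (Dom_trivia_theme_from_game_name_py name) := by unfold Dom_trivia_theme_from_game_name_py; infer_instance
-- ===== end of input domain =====

-- B re-implements the theme extraction by inspecting the tail of the word list instead of
-- string suffix matching and slicing; objective: simpler (no speed claim).

-- ===== PORT A =====
-- the 'for suffix in (" trivia game", " trivia")' loop of A
def tfgnLoop (clean : String) : List String → Option String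
  | [] => none
  | suffix :: rest =>
    if PySem.Str.endswith clean suffix then
      -- theme = clean[: -len(suffix)].strip()
      let theme := PySem.Str.strip (PySem.Str.slice clean none (some (-(PySem.Str.len suffix))))
      if theme ≠ "" then some theme else tfgnLoop clean rest
    else tfgnLoop clean rest

def trivia_theme_from_game_name_py (name : String) : Option String :=
  tfgnLoop (PySem.Str.join " " (PySem.Str.split₀ (PySem.Str.strip (PySem.Str.lower name))))
    [" trivia game", " trivia"]

-- ===== PORT B =====
-- return ' '.join(kept) if kept else None
def tfgnEmit : Option (List String) → Option String
  | some kept => if kept ≠ [] then some (PySem.Str.join " " kept) else none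
  | none => none

-- the if/elif chain on the tail of the word list
def tfgnTail (words : List String) : Option String :=
  tfgnEmit
    (if PySem.List.slice words (some (-2)) none = ["trivia", "game"] then
        some (PySem.List.slice words none (some (-2)))
     else if PySem.List.slice words (some (-1)) none = ["trivia"] then
        some (PySem.List.slice words none (some (-1)))
     else none)

def trivia_theme_from_game_name_py_alt (name : String) : Option String :=
  tfgnTail (PySem.Str.split₀ (PySem.Str.strip (PySem.Str.lower name)))

-- ===== PRECONDITION & SPEC =====
def Spec_trivia_theme_from_game_name_py (name : String) (out : Option String) : Prop := out = trivia_theme_from_game_name_py_alt name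
instance (name : String) (out : Option String) : Decidable (Spec_trivia_theme_from_game_name_py name out) := by unfold Spec_trivia_theme_from_game_name_py; infer_instance

-- ===== CLAIM (what is proved, stated in full; the proofs are below) =====
def Claim_equal_trivia_theme_from_game_name_py : Prop := ∀ (name : String), Dom_trivia_theme_from_game_name_py name → Spec_trivia_theme_from_game_name_py name (trivia_theme_from_game_name_py name)

-- ===== LEMMAS AND PROOFS =====

-- a "word": nonempty and whitespace-free (what split() produces)
def pvGood (w : List Char) : Prop := w ≠ [] ∧ ∀ c ∈ w, PySem.Chars.isspace c = false

-- single-space join of char-list words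
def pvJ : List (List Char) → List Char
  | [] => []
  | [w] => w
  | w :: x :: ws => w ++ ' ' :: pvJ (x :: ws)

lemma pvJ_cons (w : List Char) (ws : List (List Char)) (h : ws ≠ []) :
    pvJ (w :: ws) = w ++ ' ' :: pvJ ws := by
  cases ws with
  | nil => exact absurd rfl h
  | cons x xs => rfl

lemma pvJ_eq_join : ∀ L : List (List Char), PySem.Chars.join [' '] L = pvJ L := by
  intro L
  induction L with
  | nil => simp [PySem.Chars.join, pvJ, List.intercalate]
  | cons w ws ih =>
    cases ws with
    | nil => simp [PySem.Chars.join, pvJ, List.intercalate]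
    | cons x xs =>
      rw [pvJ_cons w (x :: xs) (by simp), ← ih]
      simp [PySem.Chars.join, List.intercalate, List.intersperse]

lemma pvJ_ne_nil (L : List (List Char)) (hne : L ≠ []) (hg : ∀ w ∈ L, pvGood w) :
    pvJ L ≠ [] := by
  cases L with
  | nil => exact absurd rfl hne
  | cons w ws =>
    have hw := (hg w (by simp)).1
    cases ws with
    | nil => simpa [pvJ] using hw
    | cons x xs => simp [pvJ, hw]

lemma pvJ_append (us vs : List (List Char)) (hus : us ≠ []) (hvs : vs ≠ []) :
    pvJ (us ++ vs) = pvJ us ++ ' ' :: pvJ vs := by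
  induction us with
  | nil => exact absurd rfl hus
  | cons w us' ih =>
    cases us' with
    | nil => simp [pvJ_cons w vs hvs, pvJ]
    | cons u us'' =>
      have h2 := ih (by simp)
      rw [List.cons_append, pvJ_cons w (u :: us'' ++ vs) (by simp),
        pvJ_cons w (u :: us'') (by simp), h2]
      simp

-- first-space decomposition is unique for whitespace-free words
lemma pv_first_space : ∀ (w v x y : List Char),
    (∀ c ∈ w, PySem.Chars.isspace c = false) → (∀ c ∈ v, PySem.Chars.isspace c = false) →
    w ++ ' ' :: x = v ++ ' ' :: y → w = v ∧ x = y := by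
  intro w
  induction w with
  | nil =>
    intro v x y _ hv h
    cases v with
    | nil => simpa using h
    | cons d v' =>
      simp only [List.nil_append, List.cons_append, List.cons.injEq] at h
      have := hv d (by simp)
      rw [← h.1] at this
      exact absurd this (by decide)
  | cons c w' ih =>
    intro v x y hw hv h
    cases v with
    | nil =>
      simp only [List.nil_append, List.cons_append, List.cons.injEq] at h
      have := hw c (by simp)
      rw [h.1] at this
      exact absurd this (by decide)
    | cons d v' =>
      simp only [List.cons_append, List.cons.injEq] at h
      obtain ⟨hcd, h'⟩ := h
      obtain ⟨h1, h2⟩ := ih v' x y (fun a ha => hw a (by simp [ha])) (fun a ha => hv a (by simp [ha])) h'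
      exact ⟨by simp [hcd, h1], h2⟩

lemma pvJ_inj : ∀ (L M : List (List Char)), (∀ w ∈ L, pvGood w) → (∀ w ∈ M, pvGood w) →
    pvJ L = pvJ M → L = M := by
  intro L
  induction L with
  | nil =>
    intro M _ hM h
    rcases M with _ | ⟨v, M'⟩
    · rfl
    · exact absurd (by simpa [pvJ] using h.symm) (pvJ_ne_nil (v :: M') (by simp) hM)
  | cons w L' ih =>
    intro M hL hM h
    rcases M with _ | ⟨v, M'⟩
    · exact absurd (by simpa [pvJ] using h) (pvJ_ne_nil (w :: L') (by simp) hL)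
    · have hw := hL w (by simp)
      have hv := hM v (by simp)
      rcases L' with _ | ⟨l, ls⟩
      · rcases M' with _ | ⟨m, ms⟩
        · simp only [pvJ] at h; simp [h]
        · exfalso
          rw [pvJ_cons v (m :: ms) (by simp)] at h
          have hmem : (' ' : Char) ∈ w := by
            simp only [pvJ] at h
            rw [h]; exact List.mem_append.2 (Or.inr (by simp))
          exact absurd (hw.2 ' ' hmem) (by decide)
      · rcases M' with _ | ⟨m, ms⟩
        · exfalso
          rw [pvJ_cons w (l :: ls) (by simp)] at h
          have hmem : (' ' : Char) ∈ v := by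
            simp only [pvJ] at h
            rw [← h]; exact List.mem_append.2 (Or.inr (by simp))
          exact absurd (hv.2 ' ' hmem) (by decide)
        · rw [pvJ_cons w (l :: ls) (by simp), pvJ_cons v (m :: ms) (by simp)] at h
          obtain ⟨h1, h2⟩ := pv_first_space w v _ _ hw.2 hv.2 h
          have h3 := ih (m :: ms) (fun a ha => hL a (by simp [ha]))
            (fun a ha => hM a (by simp [ha])) h2
          rw [h1, h3]

lemma pv_suffix_split {α : Type} {s a b : List α} (h : s <:+ a ++ b) :
    s <:+ b ∨ ∃ a', a' ≠ [] ∧ a' <:+ a ∧ s = a' ++ b := by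
  obtain ⟨p, hp⟩ := h
  rcases List.append_eq_append_iff.1 hp with ⟨k, hk1, hk2⟩ | ⟨k, hk1, hk2⟩
  · rcases k with _ | ⟨c, cs⟩
    · left; simp [hk2]
    · right; exact ⟨c :: cs, by simp, ⟨p, hk1.symm⟩, hk2⟩
  · left; exact ⟨k, hk2.symm⟩

-- KEY LEMMA: a space-prefixed join of words is a suffix of the join exactly when
-- the word list decomposes with those words as a proper tail
lemma pvKey : ∀ (L vs : List (List Char)), (∀ w ∈ L, pvGood w) → (∀ w ∈ vs, pvGood w) → vs ≠ [] →
    ((' ' :: pvJ vs) <:+ pvJ L ↔ ∃ us, us ≠ [] ∧ L = us ++ vs) := by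
  intro L
  induction L with
  | nil =>
    intro vs _ _ _
    constructor
    · intro h
      have h0 : (' ' :: pvJ vs) = [] := List.suffix_nil.mp (by simpa [pvJ] using h)
      simp at h0
    · rintro ⟨us, hus, h⟩
      exact absurd (List.append_eq_nil_iff.mp h.symm).1 hus
  | cons w L' ih =>
    intro vs hL hvs hvne
    have hw := hL w (by simp)
    cases L' with
    | nil =>
      constructor
      · intro h
        simp only [pvJ] at h
        exact absurd (hw.2 ' ' (h.subset (by simp))) (by decide)
      · rintro ⟨us, hus, hdec⟩
        exfalso
        have hlen := congrArg List.length hdec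
        have h1 := List.length_pos_of_ne_nil hus
        have h2 := List.length_pos_of_ne_nil hvne
        simp at hlen
        omega
    | cons l ls =>
      have hL'g : ∀ a ∈ l :: ls, pvGood a := fun a ha => hL a (by simp [ha])
      constructor
      · intro h
        rw [pvJ_cons w (l :: ls) (by simp)] at h
        rcases pv_suffix_split h with hsb | ⟨a', ha'ne, ha'w, heq⟩
        · rcases List.suffix_cons_iff.1 hsb with heq | hsuf
          · have hje : pvJ vs = pvJ (l :: ls) := by simpa using heq
            have hvL : vs = l :: ls := pvJ_inj _ _ hvs hL'g hje
            exact ⟨[w], by simp, by simp [hvL]⟩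
          · obtain ⟨us, husne, hdec⟩ := (ih vs hL'g hvs hvne).1 hsuf
            exact ⟨w :: us, by simp, by simp [hdec]⟩
        · exfalso
          rcases a' with _ | ⟨c, cs⟩
          · exact ha'ne rfl
          · have hc : c = ' ' := by
              have h0 := congrArg List.head? heq
              simp at h0
              exact h0.symm
            have hmem : c ∈ w := ha'w.subset (by simp)
            rw [hc] at hmem
            exact absurd (hw.2 ' ' hmem) (by decide)
      · rintro ⟨us, husne, hdec⟩
        rw [hdec, pvJ_append us vs husne hvne]
        exact ⟨pvJ us, rfl⟩

-- split() produces nonempty whitespace-free words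
lemma pv_split₀_go_good : ∀ (s cur : List Char) (acc : List (List Char)),
    (∀ c ∈ cur, PySem.Chars.isspace c = false) → (∀ w ∈ acc, pvGood w) →
    ∀ w ∈ PySem.Chars.split₀.go s cur acc, pvGood w := by
  intro s
  induction s with
  | nil =>
    intro cur acc hcur hacc w hw
    simp only [PySem.Chars.split₀.go] at hw
    by_cases hc : cur.isEmpty
    · rw [if_pos hc] at hw
      exact hacc w (by simpa using hw)
    · rw [if_neg hc] at hw
      have hw' : w ∈ acc ∨ w = cur.reverse := by simpa using hw
      rcases hw' with h | h
      · exact hacc w h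
      · subst h
        exact ⟨by simpa [List.isEmpty_iff] using hc, fun c hc' => hcur c (by simpa using hc')⟩
  | cons c rest ih =>
    intro cur acc hcur hacc w hw
    simp only [PySem.Chars.split₀.go] at hw
    by_cases hsp : PySem.Chars.isspace c
    · rw [if_pos hsp] at hw
      by_cases hc : cur.isEmpty
      · rw [if_pos hc] at hw
        exact ih [] acc (by simp) hacc w hw
      · rw [if_neg hc] at hw
        refine ih [] (cur.reverse :: acc) (by simp) ?_ w hw
        intro v hv
        rcases List.mem_cons.1 hv with h | h
        · subst h
          exact ⟨by simpa [List.isEmpty_iff] using hc, fun a ha => hcur a (by simpa using ha)⟩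
        · exact hacc v h
    · rw [if_neg hsp] at hw
      refine ih (c :: cur) acc ?_ hacc w hw
      intro a ha
      rcases List.mem_cons.1 ha with h | h
      · subst h; simpa using hsp
      · exact hcur a h

lemma pv_split₀_good (s : List Char) : ∀ w ∈ PySem.Chars.split₀ s, pvGood w :=
  pv_split₀_go_good s [] [] (by simp) (by simp)

lemma pvJ_head? : ∀ us : List (List Char), us ≠ [] → (∀ w ∈ us, pvGood w) →
    ∃ c, (pvJ us).head? = some c ∧ PySem.Chars.isspace c = false := by
  rintro (_ | ⟨w, ws⟩) hne hg
  · exact absurd rfl hne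
  · have hw := hg w (by simp)
    obtain ⟨c, cs, hwc⟩ := List.exists_cons_of_ne_nil hw.1
    refine ⟨c, ?_, hw.2 c (by simp [hwc])⟩
    rcases ws with _ | ⟨x, xs⟩
    · simp [pvJ, hwc]
    · rw [pvJ_cons w (x :: xs) (by simp), hwc]
      simp

lemma pvJ_getLast? : ∀ us : List (List Char), us ≠ [] → (∀ w ∈ us, pvGood w) →
    ∃ c, (pvJ us).getLast? = some c ∧ PySem.Chars.isspace c = false := by
  intro us
  induction us with
  | nil => intro h; exact absurd rfl h
  | cons w ws ih =>
    intro _ hg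
    cases ws with
    | nil =>
      have hw := hg w (by simp)
      refine ⟨w.getLast hw.1, ?_, hw.2 _ (List.getLast_mem hw.1)⟩
      simp only [pvJ]
      exact List.getLast?_eq_getLast hw.1
    | cons x xs =>
      obtain ⟨c, hc, hsp⟩ := ih (by simp) (fun a ha => hg a (by simp [ha]))
      refine ⟨c, ?_, hsp⟩
      rw [pvJ_cons w (x :: xs) (by simp)]
      rw [show (w ++ ' ' :: pvJ (x :: xs)) = (w ++ [' ']) ++ pvJ (x :: xs) by simp,
        List.getLast?_append, hc]
      rfl

-- strip is the identity on a join of words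
lemma pv_strip_pvJ (us : List (List Char)) (hne : us ≠ []) (hg : ∀ w ∈ us, pvGood w) :
    PySem.Chars.strip (pvJ us) = pvJ us := by
  obtain ⟨c, hc, hcsp⟩ := pvJ_head? us hne hg
  obtain ⟨d, hd, hdsp⟩ := pvJ_getLast? us hne hg
  have hl : PySem.Chars.lstrip (pvJ us) = pvJ us := by
    unfold PySem.Chars.lstrip
    rw [List.dropWhile_eq_self_iff]
    intro hpos
    have h0 : (pvJ us)[0]? = some c := by rw [← List.head?_eq_getElem?]; exact hc
    rw [List.getElem?_eq_getElem hpos] at h0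
    rw [Option.some_inj.mp h0, hcsp]
    simp
  have hr : PySem.Chars.rstrip (pvJ us) = pvJ us := by
    unfold PySem.Chars.rstrip
    rw [List.dropWhile_eq_self_iff.2, List.reverse_reverse]
    intro hpos
    have h0 : (pvJ us).reverse[0]? = some d := by
      rw [← List.head?_eq_getElem?, List.head?_reverse]; exact hd
    rw [List.getElem?_eq_getElem hpos] at h0
    rw [Option.some_inj.mp h0, hdsp]
    simp
  unfold PySem.Chars.strip
  rw [hl, hr]

-- tail decomposition lemmas
lemma pv_tail2 {α : Type} (ws : List α) (a b : α) :
    ws.drop (ws.length - 2) = [a, b] ↔ ∃ us, ws = us ++ [a, b] := by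
  constructor
  · intro h
    refine ⟨ws.take (ws.length - 2), ?_⟩
    conv_lhs => rw [← List.take_append_drop (ws.length - 2) ws]
    rw [h]
  · rintro ⟨us, rfl⟩
    have : us.length + 2 - 2 = us.length := by omega
    simp [this, List.drop_left]
lemma pv_tail1 {α : Type} (ws : List α) (a : α) :
    ws.drop (ws.length - 1) = [a] ↔ ∃ us, ws = us ++ [a] := by
  constructor
  · intro h
    refine ⟨ws.take (ws.length - 1), ?_⟩
    conv_lhs => rw [← List.take_append_drop (ws.length - 1) ws]
    rw [h]
  · rintro ⟨us, rfl⟩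
    have : us.length + 1 - 1 = us.length := by omega
    simp [this, List.drop_left]

-- lifting a char-level tail decomposition back to Strings
lemma pv_map_decomp (ws vs : List String) :
    (∃ usL, usL ≠ [] ∧ ws.map String.toList = usL ++ vs.map String.toList) ↔
      ∃ us, us ≠ [] ∧ ws = us ++ vs := by
  constructor
  · rintro ⟨usL, hne, h⟩
    have hlen := congrArg List.length h
    simp at hlen
    have h1 := List.length_pos_of_ne_nil hne
    refine ⟨ws.take (ws.length - vs.length), ?_, ?_⟩
    · intro hnil
      have := congrArg List.length hnil
      simp at this
      omega
    · have hdropL : (ws.map String.toList).drop usL.length = vs.map String.toList := by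
        rw [h, List.drop_left]
      have hdrop : (ws.drop (ws.length - vs.length)).map String.toList = vs.map String.toList := by
        rw [show ws.length - vs.length = usL.length by omega, List.map_drop]
        exact hdropL
      have hinj : Function.Injective String.toList := fun a b hab => String.toList_inj.mp hab
      have hd : ws.drop (ws.length - vs.length) = vs :=
        (List.map_injective_iff.mpr hinj) hdrop
      conv_lhs => rw [← List.take_append_drop (ws.length - vs.length) ws]
      rw [hd]
  · rintro ⟨us, hne, rfl⟩
    exact ⟨us.map String.toList, by simpa using hne, by simp⟩

lemma pv_join_toList (ws : List String) :
    (PySem.Str.join " " ws).toList = pvJ (ws.map String.toList) := by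
  rw [PySem.Str.toList_join]
  rw [show (" " : String).toList = [' '] from rfl, pvJ_eq_join]

-- endswith on a join, characterized by the word-list tail
lemma pvEnds (ws vs : List String) (p : String)
    (hp : p.toList = ' ' :: pvJ (vs.map String.toList))
    (hg : ∀ w ∈ ws.map String.toList, pvGood w)
    (hgv : ∀ w ∈ vs.map String.toList, pvGood w) (hvne : vs ≠ []) :
    (PySem.Str.endswith (PySem.Str.join " " ws) p = true ↔ ∃ us, us ≠ [] ∧ ws = us ++ vs) := by
  rw [PySem.Str.endswith_eq, PySem.Chars.endswith_iff, hp, pv_join_toList]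
  rw [pvKey (ws.map String.toList) (vs.map String.toList) hg hgv (by simpa using hvne)]
  exact pv_map_decomp ws vs

lemma tfgnEmit_some (kept : List String) :
    tfgnEmit (some kept) = if kept ≠ [] then some (PySem.Str.join " " kept) else none := rfl

lemma tfgnEmit_none : tfgnEmit none = none := rfl

set_option maxRecDepth 8192 in
set_option maxHeartbeats 1000000 in
-- the heart of the file: A's suffix loop agrees with B's word-tail chain on any split() output
lemma pv_main (ws : List String) (hg : ∀ w ∈ ws.map String.toList, pvGood w) :
    tfgnLoop (PySem.Str.join " " ws) [" trivia game", " trivia"] = tfgnTail ws := by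
  have hgTrivia : pvGood ("trivia" : String).toList := by
    rw [show ("trivia" : String).toList = ['t', 'r', 'i', 'v', 'i', 'a'] from rfl]
    exact ⟨by simp, by intro c hc; fin_cases hc <;> decide⟩
  have hgGame : pvGood ("game" : String).toList := by
    rw [show ("game" : String).toList = ['g', 'a', 'm', 'e'] from rfl]
    exact ⟨by simp, by intro c hc; fin_cases hc <;> decide⟩
  have hgTG : ∀ w ∈ (["trivia", "game"] : List String).map String.toList, pvGood w := by
    intro w hw
    simp at hw
    rcases hw with h | h <;> subst h
    exacts [hgTrivia, hgGame]
  have hgT : ∀ w ∈ (["trivia"] : List String).map String.toList, pvGood w := by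
    intro w hw
    simp at hw
    subst hw
    exact hgTrivia
  have he2 := pvEnds ws ["trivia", "game"] " trivia game" (by rfl) hg hgTG (by simp)
  have he1 := pvEnds ws ["trivia"] " trivia" (by rfl) hg hgT (by simp)
  by_cases h2 : ws.drop (ws.length - 2) = ["trivia", "game"]
  · obtain ⟨us, hdec⟩ := (pv_tail2 ws _ _).1 h2
    by_cases hus : us = []
    · subst hus
      simp at hdec
      subst hdec
      rfl
    · subst hdec
      have husg : ∀ w ∈ us.map String.toList, pvGood w := fun a ha => hg a (by simp [ha])
      have husLne : us.map String.toList ≠ [] := by simpa using hus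
      have hJne : pvJ (us.map String.toList) ≠ [] := pvJ_ne_nil _ husLne husg
      have hea : PySem.Str.endswith (PySem.Str.join " " (us ++ ["trivia", "game"])) " trivia game" = true :=
        he2.2 ⟨us, hus, rfl⟩
      have hcleanL : (PySem.Str.join " " (us ++ ["trivia", "game"])).toList =
          pvJ (us.map String.toList) ++ ' ' :: pvJ ((["trivia", "game"] : List String).map String.toList) := by
        rw [pv_join_toList, List.map_append, pvJ_append _ _ husLne (by simp)]
      have hthemeL : (PySem.Str.strip (PySem.Str.slice (PySem.Str.join " " (us ++ ["trivia", "game"])) none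
          (some (-(PySem.Str.len " trivia game"))))).toList = pvJ (us.map String.toList) := by
        rw [show PySem.Str.len " trivia game" = (12 : Int) from by rfl,
          PySem.Str.toList_strip, PySem.Str.toList_slice, PySem.Chars.slice_eq_listSlice,
          PySem.List.slice_to_neg_ofNat _ 12 (by omega), hcleanL]
        have hlen11 : (' ' :: pvJ ((["trivia", "game"] : List String).map String.toList)).length = 12 := by rfl
        rw [List.take_left' (by simp at hlen11 ⊢; omega)]
        exact pv_strip_pvJ _ husLne husg
      have hthemeNe : PySem.Str.strip (PySem.Str.slice (PySem.Str.join " " (us ++ ["trivia", "game"])) none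
          (some (-(PySem.Str.len " trivia game")))) ≠ "" := by
        intro h
        rw [h] at hthemeL
        exact hJne hthemeL.symm
      have hb2 : PySem.List.slice (us ++ (["trivia", "game"] : List String)) (some (-2)) none =
          ["trivia", "game"] := by
        rw [PySem.List.slice_from_neg_ofNat _ 2 (by omega)]
        exact (pv_tail2 _ _ _).2 ⟨us, rfl⟩
      have hkept : PySem.List.slice (us ++ (["trivia", "game"] : List String)) none (some (-2)) = us := by
        rw [PySem.List.slice_to_neg_ofNat _ 2 (by omega)]
        rw [show (us ++ (["trivia", "game"] : List String)).length - 2 = us.length by simp]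
        exact List.take_left
      simp only [tfgnLoop, tfgnTail, tfgnEmit_some, hea, hthemeNe, hb2, hkept, hus, ne_eq,
        eq_self_iff_true, not_false_iff, not_false_eq_true, if_true, ite_true, if_false, ite_false]
      refine congrArg some ?_
      rw [← String.toList_inj, hthemeL, pv_join_toList]
  · by_cases h1 : ws.drop (ws.length - 1) = ["trivia"]
    · obtain ⟨us, hdec⟩ := (pv_tail1 ws _).1 h1
      by_cases hus : us = []
      · subst hus
        simp at hdec
        subst hdec
        rfl
      · subst hdec
        have husg : ∀ w ∈ us.map String.toList, pvGood w := fun a ha => hg a (by simp [ha])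
        have husLne : us.map String.toList ≠ [] := by simpa using hus
        have hJne : pvJ (us.map String.toList) ≠ [] := pvJ_ne_nil _ husLne husg
        have hne2 : PySem.Str.endswith (PySem.Str.join " " (us ++ ["trivia"])) " trivia game" = false := by
          rcases hb : PySem.Str.endswith (PySem.Str.join " " (us ++ ["trivia"])) " trivia game" with _ | _
          · rfl
          · exfalso
            obtain ⟨us', hus', hdec'⟩ := he2.1 hb
            exact h2 ((pv_tail2 _ _ _).2 ⟨us', hdec'⟩)
        have hea : PySem.Str.endswith (PySem.Str.join " " (us ++ ["trivia"])) " trivia" = true :=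
          he1.2 ⟨us, hus, rfl⟩
        have hcleanL : (PySem.Str.join " " (us ++ ["trivia"])).toList =
            pvJ (us.map String.toList) ++ ' ' :: pvJ ((["trivia"] : List String).map String.toList) := by
          rw [pv_join_toList, List.map_append, pvJ_append _ _ husLne (by simp)]
        have hthemeL : (PySem.Str.strip (PySem.Str.slice (PySem.Str.join " " (us ++ ["trivia"])) none
            (some (-(PySem.Str.len " trivia"))))).toList = pvJ (us.map String.toList) := by
          rw [show PySem.Str.len " trivia" = (7 : Int) from by rfl,
            PySem.Str.toList_strip, PySem.Str.toList_slice, PySem.Chars.slice_eq_listSlice,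
            PySem.List.slice_to_neg_ofNat _ 7 (by omega), hcleanL]
          have hlen6 : (' ' :: pvJ ((["trivia"] : List String).map String.toList)).length = 7 := by rfl
          rw [List.take_left' (by simp at hlen6 ⊢; omega)]
          exact pv_strip_pvJ _ husLne husg
        have hthemeNe : PySem.Str.strip (PySem.Str.slice (PySem.Str.join " " (us ++ ["trivia"])) none
            (some (-(PySem.Str.len " trivia")))) ≠ "" := by
          intro h
          rw [h] at hthemeL
          exact hJne hthemeL.symm
        have hb2f : PySem.List.slice (us ++ (["trivia"] : List String)) (some (-2)) none ≠
            ["trivia", "game"] := by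
          rw [PySem.List.slice_from_neg_ofNat _ 2 (by omega)]
          intro h
          exact h2 ((pv_tail2 _ _ _).2 ((pv_tail2 _ _ _).1 h))
        have hb1 : PySem.List.slice (us ++ (["trivia"] : List String)) (some (-1)) none = ["trivia"] := by
          rw [PySem.List.slice_from_neg_one]
          exact (pv_tail1 _ _).2 ⟨us, rfl⟩
        have hkept : PySem.List.slice (us ++ (["trivia"] : List String)) none (some (-1)) = us := by
          rw [PySem.List.slice_to_neg_one]
          simp
        simp only [tfgnLoop, tfgnTail, tfgnEmit_some, hne2, hea, hthemeNe, hb2f, hb1, hkept,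
          hus, ne_eq, eq_self_iff_true, Bool.false_eq_true, not_false_iff, not_false_eq_true,
          if_true, ite_true, if_false, ite_false]
        refine congrArg some ?_
        rw [← String.toList_inj, hthemeL, pv_join_toList]
    · have hne2 : PySem.Str.endswith (PySem.Str.join " " ws) " trivia game" = false := by
        rcases hb : PySem.Str.endswith (PySem.Str.join " " ws) " trivia game" with _ | _
        · rfl
        · exact absurd ((pv_tail2 _ _ _).2 ⟨(he2.1 hb).choose, (he2.1 hb).choose_spec.2⟩) h2
      have hne1 : PySem.Str.endswith (PySem.Str.join " " ws) " trivia" = false := by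
        rcases hb : PySem.Str.endswith (PySem.Str.join " " ws) " trivia" with _ | _
        · rfl
        · exact absurd ((pv_tail1 _ _).2 ⟨(he1.1 hb).choose, (he1.1 hb).choose_spec.2⟩) h1
      have hb2f : PySem.List.slice ws (some (-2)) none ≠ ["trivia", "game"] := by
        rw [PySem.List.slice_from_neg_ofNat _ 2 (by omega)]
        exact h2
      have hb1f : PySem.List.slice ws (some (-1)) none ≠ ["trivia"] := by
        rw [PySem.List.slice_from_neg_one]
        exact h1
      simp only [tfgnLoop, tfgnTail, tfgnEmit_none, hne2, hne1, hb2f, hb1f, ne_eq,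
        Bool.false_eq_true, not_false_iff, if_true, ite_true, if_false, ite_false]

-- ===== VERDICT (by name: the statement is the Claim_ definition above) =====
theorem trivia_theme_from_game_name_py_spec : Claim_equal_trivia_theme_from_game_name_py := by
  intro name _
  unfold Spec_trivia_theme_from_game_name_py trivia_theme_from_game_name_py trivia_theme_from_game_name_py_alt
  apply pv_main
  rw [PySem.Str.split₀_map_toList]
  exact pv_split₀_good _
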